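-- pv_equiv track=rewrite | github.com/lingpy/pybor | src/pybor/data_tf.py | get_tokens_ids
-- ===== SOURCE A (Python) =====
-- def get_tokens_ids(tokens=None, symbol_to_id=None):
--     # Convert token list of segments to token list of int ids.
--     unk_id = symbol_to_id.get('<unk>')
--     tokens_ids = [[symbol_to_id.get(symbol, unk_id)
--             for symbol in token]
--             for token in tokens]
--     # Add start and stop symbols.
--     start_id = symbol_to_id["<s>"]
--     stop_id = symbol_to_id["</s>"]
--     tokens_ids = [[start_id]+token+[stop_id] for token in tokens_ids]
--     return tokens_ids
-- ===== SOURCE B (Python) =====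
-- def get_tokens_ids(tokens=None, symbol_to_id=None):
--     # Flat-buffer strategy: map the whole corpus into ONE flat id stream while
--     # recording each row's boundary offset, then cut the stream at consecutive
--     # boundaries and frame every piece with the start/stop ids.
--     unk_id = symbol_to_id.get('<unk>')
--     start_id = symbol_to_id["<s>"]
--     stop_id = symbol_to_id["</s>"]
--     flat = []
--     bounds = [0]
--     for token in tokens:
--         for symbol in token:
--             flat.append(symbol_to_id.get(symbol, unk_id))
--         bounds.append(len(flat))
--     return [[start_id] + flat[a:b] + [stop_id]
--             for a, b in zip(bounds, bounds[1:])]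
-- ===== Notes on version B (the rewrite author's own statement) =====
-- stated objective: alternative
-- what changed: Instead of A's per-token nested comprehensions (map each token to its own id list, then a second pass framing each row), B maps the whole corpus into ONE flat id buffer while recording row-boundary offsets, then slices the buffer at consecutive boundaries and frames each slice with the start/stop ids (a CSR-style flat-buffer-plus-offsets representation).
-- outside the precondition, e.g. on get_tokens_ids([['x']], {'<s>': 0, '</s>': 1}): A returns [[0, None, 1]], B returns [[0, None, 1]]
import Mathlib
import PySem

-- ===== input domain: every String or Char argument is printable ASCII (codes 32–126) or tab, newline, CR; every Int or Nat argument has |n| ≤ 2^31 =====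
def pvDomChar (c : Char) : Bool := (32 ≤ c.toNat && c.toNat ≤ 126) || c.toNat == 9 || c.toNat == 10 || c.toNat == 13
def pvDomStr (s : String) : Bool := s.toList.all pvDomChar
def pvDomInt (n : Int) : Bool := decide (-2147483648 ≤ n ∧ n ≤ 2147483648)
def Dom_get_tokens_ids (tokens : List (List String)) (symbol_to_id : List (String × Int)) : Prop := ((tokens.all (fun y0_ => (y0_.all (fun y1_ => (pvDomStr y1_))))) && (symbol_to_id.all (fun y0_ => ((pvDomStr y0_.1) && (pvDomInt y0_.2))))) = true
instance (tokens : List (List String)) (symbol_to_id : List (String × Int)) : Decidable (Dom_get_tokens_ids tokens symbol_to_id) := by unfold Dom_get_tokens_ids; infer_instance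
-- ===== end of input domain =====

-- B replaces A's two per-token passes by a flat-buffer representation: one flat id stream
-- plus recorded row-boundary offsets, sliced afterwards into framed rows.

-- ===== PORT A =====
-- '.getD 0' only makes the dict lookup total; under Pre_ every lookup used is a hit
-- (or falls back to a present '<unk>'), matching Python exactly.
def get_tokens_ids (tokens : List (List String)) (symbol_to_id : List (String × Int)) : List (List Int) :=
  let d := PySem.Dict.mk symbol_to_id
  let unk_id := d.get? "<unk>"
  let tokens_ids := tokens.map (fun token =>
    token.map (fun s => ((d.get? s).orElse (fun _ => unk_id)).getD 0))
  let start_id := (d.get? "<s>").getD 0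
  let stop_id := (d.get? "</s>").getD 0
  tokens_ids.map (fun token => [start_id] ++ token ++ [stop_id])

-- ===== PORT B =====
def get_tokens_ids_alt (tokens : List (List String)) (symbol_to_id : List (String × Int)) : List (List Int) :=
  let d := PySem.Dict.mk symbol_to_id
  let unk_id := d.get? "<unk>"
  let start_id := (d.get? "<s>").getD 0
  let stop_id := (d.get? "</s>").getD 0
  -- phase 1: one flat id stream + boundary offsets ('flat.append' loop = foldl; len(flat) cast to Int)
  let st := tokens.foldl (fun (st : List Int × List Int) token =>
      let flat := token.foldl (fun fl s => fl ++ [((d.get? s).orElse (fun _ => unk_id)).getD 0]) st.1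
      (flat, st.2 ++ [(flat.length : Int)])) ([], [(0 : Int)])
  -- phase 2: cut the stream at consecutive boundaries and frame each piece
  (st.2.zip (PySem.List.slice st.2 (some 1) none)).map (fun p =>
    [start_id] ++ PySem.List.slice st.1 (some p.1) (some p.2) ++ [stop_id])

-- ===== PRECONDITION & SPEC =====
-- Pre_ excludes exactly the inputs where Python A raises KeyError ('<s>' or '</s>' missing)
-- or returns a list containing None, which is not a List (List Int) value (some token symbol
-- missing while '<unk>' is also missing).
def Pre_get_tokens_ids (tokens : List (List String)) (symbol_to_id : List (String × Int)) : Prop :=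
  "<s>" ∈ symbol_to_id.map Prod.fst ∧ "</s>" ∈ symbol_to_id.map Prod.fst ∧
  ("<unk>" ∈ symbol_to_id.map Prod.fst ∨ ∀ t ∈ tokens, ∀ s ∈ t, s ∈ symbol_to_id.map Prod.fst)
instance (tokens : List (List String)) (symbol_to_id : List (String × Int)) : Decidable (Pre_get_tokens_ids tokens symbol_to_id) := by unfold Pre_get_tokens_ids; infer_instance
def pvWitness_get_tokens_ids : List (List String) × (List (String × Int)) :=
  ([["a", "b"], []], [("<s>", 0), ("</s>", 1), ("a", 2), ("<unk>", 3)])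

def Spec_get_tokens_ids (tokens : List (List String)) (symbol_to_id : List (String × Int)) (out : List (List Int)) : Prop := out = get_tokens_ids_alt tokens symbol_to_id
instance (tokens : List (List String)) (symbol_to_id : List (String × Int)) (out : List (List Int)) : Decidable (Spec_get_tokens_ids tokens symbol_to_id out) := by unfold Spec_get_tokens_ids; infer_instance

-- ===== CLAIM (what is proved, stated in full; the proofs are below) =====
def Claim_equal_get_tokens_ids : Prop := ∀ (tokens : List (List String)) (symbol_to_id : List (String × Int)), Dom_get_tokens_ids tokens symbol_to_id → Pre_get_tokens_ids tokens symbol_to_id → Spec_get_tokens_ids tokens symbol_to_id (get_tokens_ids tokens symbol_to_id)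

-- ===== LEMMAS AND PROOFS =====

-- closed form of B's phase-1 fold: the flat buffer is the flattened mapped corpus,
-- the appended bounds are the running offsets.
def pvOffs (look : String → Int) : List (List String) → Nat → List Int
  | [], _ => []
  | t :: ts, n => ((n + t.length : Nat) : Int) :: pvOffs look ts (n + t.length)

theorem pvPhase1_closed (look : String → Int) (tokens : List (List String))
    (flat0 bnds0 : List Int) :
    tokens.foldl (fun (st : List Int × List Int) token =>
        let flat := token.foldl (fun fl s => fl ++ [look s]) st.1 
        (flat, st.2 ++ [(flat.length : Int)])) (flat0, bnds0)
      = (flat0 ++ (tokens.map (fun t => t.map look)).flatten,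
         bnds0 ++ pvOffs look tokens flat0.length) := by
  induction tokens generalizing flat0 bnds0 with
  | nil => simp [pvOffs]
  | cons t ts ih =>
    have h := ih (t.foldl (fun fl s => fl ++ [look s]) flat0)
      (bnds0 ++ [((t.foldl (fun fl s => fl ++ [look s]) flat0).length : Int)])
    refine h.trans ?_
    simp [pvOffs, List.append_assoc]
    refine ⟨by rw [← List.flatMap_def, ← List.map_eq_flatMap], by simp [Function.comp_def],
      by simp [Function.comp_def]⟩

-- phase 2: cutting the flat stream at consecutive offsets recovers the mapped tokens.
theorem pvCut (look : String → Int) (start_id stop_id : Int)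
    (tokens : List (List String)) (pre : List Int) :
    ((((pre.length : Nat) : Int) :: pvOffs look tokens pre.length).zip
        (pvOffs look tokens pre.length)).map (fun p =>
      [start_id] ++ PySem.List.slice (pre ++ (tokens.map (fun t => t.map look)).flatten)
        (some p.1) (some p.2) ++ [stop_id])
      = tokens.map (fun t => [start_id] ++ t.map look ++ [stop_id]) := by
  induction tokens generalizing pre with
  | nil => simp [pvOffs]
  | cons t ts ih =>
    simp only [pvOffs, List.map_cons, List.flatten_cons, List.zip_cons_cons, List.map,
      List.cons.injEq]
    refine ⟨?_, ?_⟩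
    · have hs : PySem.List.slice (pre ++ (t.map look ++ (ts.map (fun t => t.map look)).flatten))
          (some ((pre.length : Nat) : Int)) (some ((pre.length + t.length : Nat) : Int))
          = t.map look := by
        rw [show ((pre.length + t.length : Nat) : Int)
              = ((pre.length : Nat) : Int) + ((t.length : Nat) : Int) by push_cast; ring]
        rw [PySem.List.slice_natCast_add]
        simp
      rw [hs]
    · have h := ih (pre := pre ++ t.map look)
      simpa [List.append_assoc] using h

theorem get_tokens_ids_alt_eq (tokens : List (List String)) (symbol_to_id : List (String × Int)) :
    get_tokens_ids_alt tokens symbol_to_id = get_tokens_ids tokens symbol_to_id := by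
  simp only [get_tokens_ids_alt, get_tokens_ids]
  rw [pvPhase1_closed]
  rw [PySem.List.slice_from_one]
  have h := pvCut (fun s => (((PySem.Dict.mk symbol_to_id).get? s).orElse
      (fun _ => (PySem.Dict.mk symbol_to_id).get? "<unk>")).getD 0)
    (((PySem.Dict.mk symbol_to_id).get? "<s>").getD 0)
    (((PySem.Dict.mk symbol_to_id).get? "</s>").getD 0) tokens ([] : List Int)
  simpa [List.map_map, Function.comp] using h

-- ===== VERDICT (by name: the statement is the Claim_ definition above) =====
theorem get_tokens_ids_spec : Claim_equal_get_tokens_ids := by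
  intro tokens symbol_to_id _ _
  unfold Spec_get_tokens_ids
  exact (get_tokens_ids_alt_eq tokens symbol_to_id).symm
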